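-- pv_equiv track=rewrite | github.com/johanrex/adventofcode | 2022/15/15.py | get_coords_within_distance_p1
-- ===== SOURCE A (Python) =====
-- def get_distance(a: tuple[int, int], b: tuple[int, int]):
--     return abs(a[0] - b[0]) + abs(a[1] - b[1])
--
-- def get_coords_within_distance_p1(coord: tuple[int, int], distance, row):
--     x, y = coord
--     coords = set()
--
--     # for x_i in range(x - distance, (x + distance) + 1):
--
--     # for y_i in range(y - distance, (y + distance) + 1):
--     y_i = row
--     for x_i in range(x - distance, (x + distance) + 1):
--         coord_candidate = (x_i, y_i)
--         if get_distance(coord, coord_candidate) > distance: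
--             continue
--         else:
--             coords.add(coord_candidate)
--
--     return coords
-- ===== SOURCE B (Python) =====
-- def get_coords_within_distance_p1(coord, distance, row):
--     x, y = coord
--     rem = distance - abs(y - row)
--     if rem < 0:
--         return set()
--     return {(x_i, row) for x_i in range(x - rem, x + rem + 1)}
-- ===== Notes on version B (the rewrite author's own statement) =====
-- stated objective: faster
-- what changed: B computes rem = distance - |y - row| in closed form and iterates only the exact valid x-interval [x-rem, x+rem] (empty when rem < 0), instead of scanning the full 2*distance+1 window and testing each candidate's Manhattan distance.
import Mathlib
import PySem

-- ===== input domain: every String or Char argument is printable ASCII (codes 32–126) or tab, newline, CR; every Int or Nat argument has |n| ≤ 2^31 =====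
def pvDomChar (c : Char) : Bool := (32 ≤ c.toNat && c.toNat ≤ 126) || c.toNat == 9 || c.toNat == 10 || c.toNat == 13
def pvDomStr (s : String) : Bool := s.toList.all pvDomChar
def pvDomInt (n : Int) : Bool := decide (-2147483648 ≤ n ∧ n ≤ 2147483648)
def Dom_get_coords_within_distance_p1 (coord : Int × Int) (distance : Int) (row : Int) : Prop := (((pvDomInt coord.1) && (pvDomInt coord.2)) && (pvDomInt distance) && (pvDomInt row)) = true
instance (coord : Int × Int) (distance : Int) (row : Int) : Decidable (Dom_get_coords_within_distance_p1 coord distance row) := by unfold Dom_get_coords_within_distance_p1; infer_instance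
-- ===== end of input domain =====

-- B replaces A's scan of the full 2*distance+1 window with the exact closed-form x-interval
-- [x-rem, x+rem], rem = distance - |y - row| (objective: faster, asymptotic when |y-row| is large).
-- Equivalence is about the returned set; both Pythons return Python sets (no argument mutation).

-- ===== PORT A =====
def pyGetDistance (a : Int × Int) (b : Int × Int) : Int := |a.1 - b.1| + |a.2 - b.2|

def get_coords_within_distance_p1 (coord : Int × Int) (distance : Int) (row : Int) : List (Int × Int) :=
  -- x, y = coord; y_i = row; loop over range(x-distance, x+distance+1) adding to the set
  let x := coord.1
  (PySem.List.pyRange (x - distance) ((x + distance) + 1) 1).foldl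
    (fun coords x_i =>
      let coord_candidate := (x_i, row)
      if pyGetDistance coord coord_candidate > distance then coords
      else PySem.Set.add coords coord_candidate)
    (PySem.Set.empty)

-- ===== PORT B =====
def get_coords_within_distance_p1_alt (coord : Int × Int) (distance : Int) (row : Int) : List (Int × Int) :=
  let x := coord.1
  let y := coord.2
  let rem := distance - |y - row|
  if rem < 0 then PySem.Set.empty
  else PySem.Set.ofList ((PySem.List.pyRange (x - rem) (x + rem + 1) 1).map (fun x_i => (x_i, row)))

-- ===== PRECONDITION & SPEC =====
def Spec_get_coords_within_distance_p1 (coord : Int × Int) (distance : Int) (row : Int) (out : List (Int × Int)) : Prop := out = get_coords_within_distance_p1_alt coord distance row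
instance (coord : Int × Int) (distance : Int) (row : Int) (out : List (Int × Int)) : Decidable (Spec_get_coords_within_distance_p1 coord distance row out) := by unfold Spec_get_coords_within_distance_p1; infer_instance

-- ===== CLAIM (what is proved, stated in full; the proofs are below) =====
def Claim_equal_get_coords_within_distance_p1 : Prop := ∀ (coord : Int × Int) (distance : Int) (row : Int), Dom_get_coords_within_distance_p1 coord distance row → Spec_get_coords_within_distance_p1 coord distance row (get_coords_within_distance_p1 coord distance row)

-- ===== LEMMAS AND PROOFS =====

-- A's loop, on a nodup list of x's whose candidates are fresh, appends exactly the passing candidates.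
lemma foldA_eq_filter_map (coord : Int × Int) (distance row : Int) :
    ∀ (L : List Int) (s : List (Int × Int)), L.Nodup → (∀ xi ∈ L, (xi, row) ∉ s) →
      L.foldl
        (fun coords x_i =>
          let coord_candidate := (x_i, row)
          if pyGetDistance coord coord_candidate > distance then coords
          else PySem.Set.add coords coord_candidate) s
      = s ++ (L.filter (fun x_i => decide (pyGetDistance coord (x_i, row) ≤ distance))).map (fun x_i => (x_i, row)) := by
  intro L
  induction L with
  | nil => intro s _ _; simp
  | cons a t ih =>
    intro s hnd hfresh
    rw [List.foldl_cons]
    by_cases hp : pyGetDistance coord (a, row) > distance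
    · rw [List.filter_cons_of_neg (by simpa using hp)]
      have hstep : (let coord_candidate := (a, row);
          if pyGetDistance coord coord_candidate > distance then s
          else PySem.Set.add s coord_candidate) = s := by simp [hp]
      rw [hstep]
      exact ih s hnd.of_cons (fun xi hxi => hfresh xi (List.mem_cons_of_mem _ hxi))
    · rw [List.filter_cons_of_pos (by simpa using not_lt.mp hp)]
      have hadd : PySem.Set.add s (a, row) = s ++ [(a, row)] := by
        have : (a, row) ∉ s := hfresh a List.mem_cons_self
        simp [PySem.Set.add, PySem.Set.contains, this]
      have hstep : (let coord_candidate := (a, row);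
          if pyGetDistance coord coord_candidate > distance then s
          else PySem.Set.add s coord_candidate) = s ++ [(a, row)] := by
        simp only [if_neg hp]; exact hadd
      rw [hstep, ih (s ++ [(a, row)]) hnd.of_cons]
      · simp
      · intro xi hxi
        simp only [List.mem_append, List.mem_singleton, not_or]
        refine ⟨hfresh xi (List.mem_cons_of_mem _ hxi), ?_⟩
        intro hc
        have hxa : xi = a := congrArg Prod.fst hc
        exact (List.nodup_cons.mp hnd).1 (hxa ▸ hxi)

-- The passing x's of the full window are exactly the interval [x-rem, x+rem].
lemma filter_window_eq (coord : Int × Int) (distance row : Int)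
    (h : ¬ distance - |coord.2 - row| < 0) :
    (PySem.List.pyRange (coord.1 - distance) (coord.1 + distance + 1) 1).filter
      (fun x_i => decide (pyGetDistance coord (x_i, row) ≤ distance))
    = PySem.List.pyRange (coord.1 - (distance - |coord.2 - row|)) (coord.1 + (distance - |coord.2 - row|) + 1) 1 := by
  set x := coord.1 with hx
  set k := |coord.2 - row| with hk
  have hk0 : 0 ≤ k := abs_nonneg _
  set rem := distance - k with hrem
  have hrem0 : 0 ≤ rem := by omega
  have h1 : x - distance ≤ x - rem := by omega
  have h2 : x - rem ≤ x + rem + 1 := by omega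
  have h3 : x + rem + 1 ≤ x + distance + 1 := by omega
  rw [PySem.List.pyRange_one_append (x - distance) (x - rem) (x + distance + 1) h1 (by omega),
      PySem.List.pyRange_one_append (x - rem) (x + rem + 1) (x + distance + 1) h2 h3]
  rw [List.filter_append, List.filter_append]
  have hcond : ∀ x_i : Int, pyGetDistance coord (x_i, row) = |x - x_i| + k := by
    intro x_i; simp only [pyGetDistance]; rw [← hx, ← hk]
  have hleft : (PySem.List.pyRange (x - distance) (x - rem) 1).filter
      (fun x_i => decide (pyGetDistance coord (x_i, row) ≤ distance)) = [] := by
    rw [List.filter_eq_nil_iff]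
    intro x_i hmem
    have hb := PySem.List.mem_pyRange_one.mp hmem
    have hax : x - x_i ≤ |x - x_i| := le_abs_self _
    simp only [hcond, decide_eq_true_eq]
    omega
  have hright : (PySem.List.pyRange (x + rem + 1) (x + distance + 1) 1).filter
      (fun x_i => decide (pyGetDistance coord (x_i, row) ≤ distance)) = [] := by
    rw [List.filter_eq_nil_iff]
    intro x_i hmem
    have hb := PySem.List.mem_pyRange_one.mp hmem
    have hax : x_i - x ≤ |x - x_i| := by rw [abs_sub_comm]; exact le_abs_self _
    simp only [hcond, decide_eq_true_eq]
    omega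
  have hmid : (PySem.List.pyRange (x - rem) (x + rem + 1) 1).filter
      (fun x_i => decide (pyGetDistance coord (x_i, row) ≤ distance))
      = PySem.List.pyRange (x - rem) (x + rem + 1) 1 := by
    rw [List.filter_eq_self]
    intro x_i hmem
    have hb := PySem.List.mem_pyRange_one.mp hmem
    have habs : |x - x_i| ≤ rem := abs_le.mpr ⟨by omega, by omega⟩
    simp only [hcond, decide_eq_true_eq]
    omega
  rw [hleft, hright, hmid]
  simp

lemma filter_window_empty (coord : Int × Int) (distance row : Int)
    (h : distance - |coord.2 - row| < 0) :
    (PySem.List.pyRange (coord.1 - distance) (coord.1 + distance + 1) 1).filter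
      (fun x_i => decide (pyGetDistance coord (x_i, row) ≤ distance)) = [] := by
  rw [List.filter_eq_nil_iff]
  intro x_i hmem
  have hk0 : 0 ≤ |coord.1 - x_i| := abs_nonneg _
  simp only [pyGetDistance, decide_eq_true_eq]
  omega

-- ===== VERDICT (by name: the statement is the Claim_ definition above) =====
theorem get_coords_within_distance_p1_spec : Claim_equal_get_coords_within_distance_p1 := by
  intro coord distance row _
  unfold Spec_get_coords_within_distance_p1 get_coords_within_distance_p1 get_coords_within_distance_p1_alt
  rw [foldA_eq_filter_map coord distance row _ PySem.Set.empty
        (PySem.List.nodup_pyRange_one _ _) (by intro xi _ hc; simp [PySem.Set.empty] at hc)]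
  by_cases h : distance - |coord.2 - row| < 0
  · rw [if_pos h, filter_window_empty coord distance row h]
    simp [PySem.Set.empty]
  · rw [if_neg h, filter_window_eq coord distance row h]
    rw [PySem.Set.ofList_eq_self_of_nodup]
    · simp [PySem.Set.empty]
    · have hinj : Function.Injective (fun x_i : Int => (x_i, row)) := by
        intro a b hab; exact congrArg Prod.fst hab
      exact (PySem.List.nodup_pyRange_one _ _).map hinj
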